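-- pv_equiv track=rewrite | github.com/asuramaya/conker | carving_machine/data.py | strip_gutenberg_boilerplate
-- ===== SOURCE A (Python) =====
-- def strip_gutenberg_boilerplate(text: str) -> str:
--     lines = text.splitlines()
--     start = 0
--     end = len(lines)
--     for idx, line in enumerate(lines):
--         upper = line.upper()
--         if "*** START OF" in upper or "***START OF" in upper:
--             start = idx + 1
--             break
--     for idx in range(len(lines) - 1, -1, -1):
--         upper = lines[idx].upper()
--         if "*** END OF" in upper or "***END OF" in upper:
--             end = idx
--             break
--     return "\n".join(lines[start:end])
-- ===== SOURCE B (Python) =====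
-- def strip_gutenberg_boilerplate(text: str) -> str:
--     lines = text.splitlines()
--     start = 0
--     start_found = False
--     end = len(lines)
--     for idx, line in enumerate(lines):
--         upper = line.upper()
--         if not start_found and ("*** START OF" in upper or "***START OF" in upper):
--             start = idx + 1
--             start_found = True
--         if "*** END OF" in upper or "***END OF" in upper:
--             end = idx
--     return "\n".join(lines[start:end])
-- ===== Notes on version B (the rewrite author's own statement) =====
-- stated objective: alternative
-- what changed: Replaces A's two opposite-direction scans (forward break-loop for the first start marker, backward break-loop for the last end marker) with a single forward pass over enumerate(lines) that latches the first start match and overwrites the end index on every end match.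
import Mathlib
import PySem

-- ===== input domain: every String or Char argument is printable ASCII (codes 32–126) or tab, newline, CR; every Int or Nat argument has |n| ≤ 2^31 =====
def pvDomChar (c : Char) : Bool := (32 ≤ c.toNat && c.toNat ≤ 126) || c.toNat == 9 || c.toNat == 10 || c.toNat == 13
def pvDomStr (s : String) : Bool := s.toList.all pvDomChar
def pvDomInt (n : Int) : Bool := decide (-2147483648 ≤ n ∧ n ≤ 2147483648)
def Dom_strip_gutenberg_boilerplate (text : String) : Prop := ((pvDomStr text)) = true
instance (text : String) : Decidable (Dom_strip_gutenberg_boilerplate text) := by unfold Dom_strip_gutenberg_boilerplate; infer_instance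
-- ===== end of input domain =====

-- B does one forward pass over enumerate(lines) instead of A's two opposite-direction break-loops; same O(n) cost, different decomposition.

-- shared marker tests (both Pythons contain these literal conditions)
def gbHitStart (upper : String) : Bool :=
  PySem.Str.isIn "*** START OF" upper || PySem.Str.isIn "***START OF" upper
def gbHitEnd (upper : String) : Bool :=
  PySem.Str.isIn "*** END OF" upper || PySem.Str.isIn "***END OF" upper

-- ===== PORT A =====
-- A's first loop: forward over enumerate(lines), break on first start marker (default start = 0)
def gbStartLoop : List (Int × String) → Int
  | [] => 0
  | (idx, line) :: rest =>
    let upper := PySem.Str.upper line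
    if gbHitStart upper then idx + 1 else gbStartLoop rest

-- A's second loop: over range(len(lines)-1, -1, -1), break on first end marker (default e)
def gbEndLoop (lines : List String) : List Int → Int → Int
  | [], e => e
  | idx :: rest, e =>
    let upper := PySem.Str.upper (PySem.List.pyGetD lines idx "")
    if gbHitEnd upper then idx else gbEndLoop lines rest e

def strip_gutenberg_boilerplate (text : String) : String :=
  let lines := PySem.Str.splitlines text
  let start := gbStartLoop (PySem.List.enumerate lines 0)
  let e := gbEndLoop lines (PySem.List.pyRange ((lines.length : Int) - 1) (-1) (-1)) (lines.length : Int)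
  PySem.Str.join "\n" (PySem.List.slice lines (some start) (some e))

-- ===== PORT B =====
-- one step of B's single forward pass; state = (start, start_found, end)
def gbScanStep (st : Int × Bool × Int) (p : Int × String) : Int × Bool × Int :=
  let upper := PySem.Str.upper p.2
  let st1 := if !st.2.1 && gbHitStart upper then (p.1 + 1, true, st.2.2) else st
  if gbHitEnd upper then (st1.1, st1.2.1, p.1) else st1

def strip_gutenberg_boilerplate_alt (text : String) : String :=
  let lines := PySem.Str.splitlines text
  let res := (PySem.List.enumerate lines 0).foldl gbScanStep (0, false, (lines.length : Int))
  PySem.Str.join "\n" (PySem.List.slice lines (some res.1) (some res.2.2))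

-- ===== PRECONDITION & SPEC =====
def Spec_strip_gutenberg_boilerplate (text : String) (out : String) : Prop := out = strip_gutenberg_boilerplate_alt text
instance (text : String) (out : String) : Decidable (Spec_strip_gutenberg_boilerplate text out) := by unfold Spec_strip_gutenberg_boilerplate; infer_instance

-- ===== CLAIM (what is proved, stated in full; the proofs are below) =====
def Claim_equal_strip_gutenberg_boilerplate : Prop := ∀ (text : String), Dom_strip_gutenberg_boilerplate text → Spec_strip_gutenberg_boilerplate text (strip_gutenberg_boilerplate text)

-- ===== LEMMAS AND PROOFS =====

-- once start_found is true, the start component never changes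
theorem gbScan_fst_found (l : List (Int × String)) (st e : Int) :
    (l.foldl gbScanStep (st, true, e)).1 = st := by
  induction l generalizing e with
  | nil => rfl
  | cons p rest ih =>
    simp only [List.foldl_cons, gbScanStep, Bool.not_true, Bool.false_and,
      Bool.false_eq_true, if_false]
    split_ifs <;> exact ih _

-- B's start component equals A's first break-loop
theorem gbScan_fst (l : List (Int × String)) (e : Int) :
    (l.foldl gbScanStep (0, false, e)).1 = gbStartLoop l := by
  induction l generalizing e with
  | nil => rfl
  | cons p rest ih =>
    obtain ⟨idx, line⟩ := p
    simp only [List.foldl_cons, gbScanStep, gbStartLoop]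
    by_cases hs : gbHitStart (PySem.Str.upper line) <;>
      by_cases he : gbHitEnd (PySem.Str.upper line) <;>
        simp [hs, he, gbScan_fst_found, ih]

-- B's end component depends only on the list and the initial end
theorem gbScan_end (l : List (Int × String)) (st : Int) (f : Bool) (e : Int) :
    (l.foldl gbScanStep (st, f, e)).2.2
      = l.foldl (fun acc p => if gbHitEnd (PySem.Str.upper p.2) then p.1 else acc) e := by
  induction l generalizing st f e with
  | nil => rfl
  | cons p rest ih =>
    simp only [List.foldl_cons, gbScanStep]
    split_ifs <;> exact ih _ _ _

-- A's break-loop over an appended index list composes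
theorem gbEndLoop_append (lines : List String) (l m : List Int) (e : Int) :
    gbEndLoop lines (l ++ m) e = gbEndLoop lines l (gbEndLoop lines m e) := by
  induction l with
  | nil => rfl
  | cons i rest ih =>
    simp only [List.cons_append, gbEndLoop]
    split_ifs <;> simp [ih]

-- first hit scanning a reversed index list = last hit of a forward fold
theorem gbEndLoop_reverse (lines : List String) (idxs : List Int) (e : Int) :
    gbEndLoop lines idxs.reverse e
      = idxs.foldl (fun acc j =>
          if gbHitEnd (PySem.Str.upper (PySem.List.pyGetD lines j "")) then j else acc) e := by
  induction idxs generalizing e with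
  | nil => rfl
  | cons i rest ih =>
    rw [List.reverse_cons, gbEndLoop_append, List.foldl_cons, ih]
    simp [gbEndLoop]

-- ===== VERDICT (by name: the statement is the Claim_ definition above) =====
theorem strip_gutenberg_boilerplate_spec : Claim_equal_strip_gutenberg_boilerplate := by
  intro text _
  unfold Spec_strip_gutenberg_boilerplate strip_gutenberg_boilerplate strip_gutenberg_boilerplate_alt
  dsimp only
  rw [gbScan_fst, gbScan_end]
  rw [PySem.List.enumerate_eq_map_pyRange _ "", List.foldl_map]
  have hrev : PySem.List.pyRange ((((PySem.Str.splitlines text).length : Int)) - 1) (-1) (-1)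
      = (PySem.List.pyRange 0 ((PySem.Str.splitlines text).length : Int) 1).reverse := by
    rw [PySem.List.pyRange_neg_one_eq_reverse]
    norm_num
  rw [hrev, gbEndLoop_reverse]
  simp [PySem.List.len]
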